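-- pv_equiv track=rewrite | github.com/k-harada/AtCoder | ABC/ABC162/D.py | solve
-- ===== SOURCE A (Python) =====
-- def solve(n, s):
--
--     r_list = [i for i in range(n) if s[i] == "R"]
--     g_list = [i for i in range(n) if s[i] == "G"]
--     # b_list = [i for i in range(n) if s[i] == "B"]
--     b_dict = {i: 1 for i in range(n) if s[i] == "B"}
--
--     res = len(r_list) * len(g_list) * len(b_dict.keys())
--     for i in r_list:
--         for j in g_list:
--             # candidate
--             m, n = min(i, j), max(i, j)
--             if n + (n - m) in b_dict.keys():
--                 res -= 1
--             if m - (n - m) in b_dict.keys():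
--                 res -= 1
--             if (n - m) % 2 == 0 and (n + m) // 2 in b_dict.keys():
--                 res -= 1
--
--     return res
-- ===== SOURCE B (Python) =====
-- PERMS = (('R', 'G', 'B'), ('R', 'B', 'G'), ('G', 'R', 'B'),
--          ('G', 'B', 'R'), ('B', 'R', 'G'), ('B', 'G', 'R'))
--
--
-- def solve(n, s):
--     counts = {}
--     for j in range(n):
--         counts[s[j]] = counts.get(s[j], 0) + 1
--     res = counts.get('R', 0) * counts.get('G', 0) * counts.get('B', 0)
--     for c in range(n):
--         for d in range(1, min(c, n - 1 - c) + 1):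
--             if (s[c - d], s[c], s[c + d]) in PERMS:
--                 res -= 1
--     return res
-- ===== Notes on version B (the rewrite author's own statement) =====
-- stated objective: alternative
-- what changed: B replaces A's R-list/G-list pair enumeration with B-position dictionary lookups by a single character-count dict pass plus a direct (center, distance) scan over positions that subtracts each all-distinct RGB arithmetic-progression triple once.
import Mathlib
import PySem

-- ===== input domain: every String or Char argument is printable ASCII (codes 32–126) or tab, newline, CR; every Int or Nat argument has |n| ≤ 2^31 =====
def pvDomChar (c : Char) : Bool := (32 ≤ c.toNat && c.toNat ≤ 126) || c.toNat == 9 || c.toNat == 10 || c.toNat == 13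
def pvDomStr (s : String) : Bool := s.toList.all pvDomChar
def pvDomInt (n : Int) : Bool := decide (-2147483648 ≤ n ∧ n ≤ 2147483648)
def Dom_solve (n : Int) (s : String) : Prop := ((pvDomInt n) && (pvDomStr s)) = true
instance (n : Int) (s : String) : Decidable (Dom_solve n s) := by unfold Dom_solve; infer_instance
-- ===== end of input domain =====

-- B is an alternative O(n^2) algorithm: it counts colour occurrences in one dict pass and
-- subtracts arithmetic-progression triples by scanning (center, distance) pairs directly.

-- ===== PORT A =====
def solve (n : Int) (s : String) : Int :=
  let r_list := (PySem.List.pyRange 0 n 1).filter (fun i => PySem.Str.pyGet? s i == some 'R')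
  let g_list := (PySem.List.pyRange 0 n 1).filter (fun i => PySem.Str.pyGet? s i == some 'G')
  let b_dict := ((PySem.List.pyRange 0 n 1).filter (fun i => PySem.Str.pyGet? s i == some 'B')).foldl
      (fun d i => d.insert i (1 : Int)) (PySem.Dict.empty : PySem.Dict Int Int)
  let res : Int := (r_list.length : Int) * (g_list.length : Int) * (b_dict.keys.length : Int)
  r_list.foldl (fun res i =>
    g_list.foldl (fun res j =>
      let m := min i j
      let M := max i j
      let res := if b_dict.contains (M + (M - m)) then res - 1 else res
      let res := if b_dict.contains (m - (M - m)) then res - 1 else res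
      if PySem.Int.mod (M - m) 2 == 0 && b_dict.contains (PySem.Int.floordiv (M + m) 2) then
        res - 1 else res) res) res

-- ===== PORT B =====
def pvPerms : List (Char × Char × Char) :=
  [('R','G','B'), ('R','B','G'), ('G','R','B'), ('G','B','R'), ('B','R','G'), ('B','G','R')]

def solve_alt (n : Int) (s : String) : Int :=
  let counts := (PySem.List.pyRange 0 n 1).foldl
    (fun d j =>
      let c := (PySem.Str.pyGet? s j).getD ' '
      d.insert c (d.getD c 0 + 1)) (PySem.Dict.empty : PySem.Dict Char Int)
  let res := counts.getD 'R' 0 * counts.getD 'G' 0 * counts.getD 'B' 0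
  (PySem.List.pyRange 0 n 1).foldl (fun res c =>
    (PySem.List.pyRange 1 (min c (n - 1 - c) + 1) 1).foldl (fun res d =>
      if pvPerms.contains ((PySem.Str.pyGet? s (c - d)).getD ' ',
                           (PySem.Str.pyGet? s c).getD ' ',
                           (PySem.Str.pyGet? s (c + d)).getD ' ') then res - 1 else res) res) res

-- ===== PRECONDITION & SPEC =====
-- Pre: Python A indexes s[i] for every i in range(n), so it raises IndexError iff n > len(s).
def Pre_solve (n : Int) (s : String) : Prop := n ≤ (s.toList.length : Int)
instance (n : Int) (s : String) : Decidable (Pre_solve n s) := by unfold Pre_solve; infer_instance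
def pvWitness_solve : Int × String := (6, "RGBGRB")

def Spec_solve (n : Int) (s : String) (out : Int) : Prop := out = solve_alt n s
instance (n : Int) (s : String) (out : Int) : Decidable (Spec_solve n s out) := by unfold Spec_solve; infer_instance

-- ===== CLAIM (what is proved, stated in full; the proofs are below) =====
def Claim_equal_solve : Prop := ∀ (n : Int) (s : String), Dom_solve n s → Pre_solve n s → Spec_solve n s (solve n s)

-- ===== LEMMAS AND PROOFS =====

-- column k of the scanned prefix (all indices used below are < N ≤ length)
def pvCol (l : List Char) (k : ℕ) : Char := l.getD k ' '

def pvCnt (l : List Char) (N : ℕ) (c : Char) : ℕ :=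
  ((List.range N).filter (fun k => pvCol l k == c)).length

def pvPP (N : ℕ) : Finset (ℕ × ℕ) := Finset.range N ×ˢ Finset.range N

-- the three B-position cases fired by A's inner loop, over (i,j) ∈ R × G
def pvP1 (l : List Char) (N : ℕ) (p : ℕ × ℕ) : Bool :=
  (pvCol l p.1 == 'R') && (pvCol l p.2 == 'G') &&
    (decide (2 * max p.1 p.2 - min p.1 p.2 < N) && (pvCol l (2 * max p.1 p.2 - min p.1 p.2) == 'B'))
def pvP2 (l : List Char) (_N : ℕ) (p : ℕ × ℕ) : Bool :=
  (pvCol l p.1 == 'R') && (pvCol l p.2 == 'G') &&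
    (decide (max p.1 p.2 - min p.1 p.2 ≤ min p.1 p.2) && (pvCol l (2 * min p.1 p.2 - max p.1 p.2) == 'B'))
def pvP3 (l : List Char) (_N : ℕ) (p : ℕ × ℕ) : Bool :=
  (pvCol l p.1 == 'R') && (pvCol l p.2 == 'G') &&
    (decide ((max p.1 p.2 - min p.1 p.2) % 2 = 0) && (pvCol l ((max p.1 p.2 + min p.1 p.2) / 2) == 'B'))

-- B's (center, distance) pairs that hit an RGB arithmetic-progression triple
def pvAP (l : List Char) (N : ℕ) (p : ℕ × ℕ) : Bool :=
  decide (1 ≤ p.2) && decide (p.2 ≤ p.1) && decide (p.1 + p.2 < N) &&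
    decide ((pvCol l (p.1 - p.2), pvCol l p.1, pvCol l (p.1 + p.2)) ∈ pvPerms)

-- generic glue -------------------------------------------------------------

theorem pvFoldl_sub {a : Type} (l : List a) (f : a → Int) (c : Int) :
    l.foldl (fun acc x => acc - f x) c = c - (l.map f).sum := by
  have hneg : ∀ (m : List a), (m.map (fun x => -f x)).sum = -(m.map f).sum := by
    intro m
    induction m with
    | nil => simp
    | cons x xs ih => simp [ih]; ring
  have := PySem.List.foldl_add l (fun x => -f x) c
  simp only [sub_eq_add_neg]
  rw [this, hneg]

theorem pvSum_filter (N : ℕ) (p : ℕ → Bool) (f : ℕ → Int) :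
    (((List.range N).filter p).map f).sum = ∑ i ∈ Finset.range N, if p i then f i else 0 := by
  induction N with
  | zero => simp
  | succ n ih => rw [List.range_succ, List.filter_append, List.map_append, List.sum_append,
      Finset.sum_range_succ, ← ih]; by_cases h : p n <;> simp [h]

theorem pvSplit (N : ℕ) (P Q : ℕ → Bool) (A B C : ℕ → ℕ → Bool) :
    (∑ i ∈ Finset.range N, if P i then
        (∑ j ∈ Finset.range N, if Q j then
          ((if A i j then (1:Int) else 0) + (if B i j then 1 else 0) + (if C i j then 1 else 0))
        else 0) else 0)
    = (((pvPP N).filter (fun p => P p.1 && Q p.2 && A p.1 p.2)).card : Int)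
      + ((pvPP N).filter (fun p => P p.1 && Q p.2 && B p.1 p.2)).card
      + ((pvPP N).filter (fun p => P p.1 && Q p.2 && C p.1 p.2)).card := by
  have step : ∀ i ∈ Finset.range N, (if P i then
        (∑ j ∈ Finset.range N, if Q j then
          ((if A i j then (1:Int) else 0) + (if B i j then 1 else 0) + (if C i j then 1 else 0))
        else 0) else 0)
      = ∑ j ∈ Finset.range N,
          ((if (P i && Q j && A i j : Bool) then (1:Int) else 0)
           + (if (P i && Q j && B i j : Bool) then 1 else 0)
           + (if (P i && Q j && C i j : Bool) then 1 else 0)) := by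
    intro i _
    by_cases hP : P i
    · rw [if_pos hP]
      refine Finset.sum_congr rfl ?_
      intro j _
      by_cases hQ : Q j
      · simp [hP, hQ]
      · simp [hP, hQ]
    · simp [hP]
  rw [Finset.sum_congr rfl step]
  simp only [Finset.sum_add_distrib]
  rw [← Finset.sum_product' (f := fun i j => if (P i && Q j && A i j : Bool) then (1:Int) else 0),
      ← Finset.sum_product' (f := fun i j => if (P i && Q j && B i j : Bool) then (1:Int) else 0),
      ← Finset.sum_product' (f := fun i j => if (P i && Q j && C i j : Bool) then (1:Int) else 0)]
  rw [Finset.sum_boole, Finset.sum_boole, Finset.sum_boole]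
  rfl

-- A-side closed form --------------------------------------------------------

theorem pvA_loop (bd : PySem.Dict Int Int) (rI gI : List Int) (c : Int) :
    rI.foldl (fun res i => gI.foldl (fun res j =>
        let m := min i j
        let M := max i j
        let res := if bd.contains (M + (M - m)) then res - 1 else res
        let res := if bd.contains (m - (M - m)) then res - 1 else res
        if PySem.Int.mod (M - m) 2 == 0 && bd.contains (PySem.Int.floordiv (M + m) 2) then
          res - 1 else res) res) c
    = c - (rI.map (fun i => (gI.map (fun j =>
          (if bd.contains (max i j + (max i j - min i j)) then (1:Int) else 0)
          + (if bd.contains (min i j - (max i j - min i j)) then 1 else 0)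
          + (if PySem.Int.mod (max i j - min i j) 2 == 0 &&
               bd.contains (PySem.Int.floordiv (max i j + min i j) 2) then 1 else 0))).sum)).sum := by
  have hin : ∀ (i : Int) (res : Int), gI.foldl (fun res j =>
        let m := min i j
        let M := max i j
        let res := if bd.contains (M + (M - m)) then res - 1 else res
        let res := if bd.contains (m - (M - m)) then res - 1 else res
        if PySem.Int.mod (M - m) 2 == 0 && bd.contains (PySem.Int.floordiv (M + m) 2) then
          res - 1 else res) res
      = res - (gI.map (fun j =>
          (if bd.contains (max i j + (max i j - min i j)) then (1:Int) else 0)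
          + (if bd.contains (min i j - (max i j - min i j)) then 1 else 0)
          + (if PySem.Int.mod (max i j - min i j) 2 == 0 &&
               bd.contains (PySem.Int.floordiv (max i j + min i j) 2) then 1 else 0))).sum := by
    intro i res
    rw [List.foldl_ext _ (fun res j =>
        res - ((if bd.contains (max i j + (max i j - min i j)) then (1:Int) else 0)
          + (if bd.contains (min i j - (max i j - min i j)) then 1 else 0)
          + (if PySem.Int.mod (max i j - min i j) 2 == 0 &&
               bd.contains (PySem.Int.floordiv (max i j + min i j) 2) then 1 else 0)))]
    · exact pvFoldl_sub _ _ _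
    · intro a j _
      simp only
      split_ifs <;> ring
  rw [List.foldl_ext _ (fun res i =>
      res - (gI.map (fun j =>
          (if bd.contains (max i j + (max i j - min i j)) then (1:Int) else 0)
          + (if bd.contains (min i j - (max i j - min i j)) then 1 else 0)
          + (if PySem.Int.mod (max i j - min i j) 2 == 0 &&
               bd.contains (PySem.Int.floordiv (max i j + min i j) 2) then 1 else 0))).sum)]
  · exact pvFoldl_sub _ _ _
  · intro a i _
    exact hin i a

theorem pvFilter_eq (s : String) (N : ℕ) (c : Char) (h : N ≤ s.toList.length) :
    (PySem.List.pyRange 0 (N:Int) 1).filter (fun i => PySem.Str.pyGet? s i == some c)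
      = ((List.range N).filter (fun k => pvCol s.toList k == c)).map (fun (k:ℕ) => (k:Int)) := by
  have hcong : List.filter ((fun i => PySem.Str.pyGet? s i == some c) ∘ (fun (k:ℕ) => (k:Int)))
      (List.range N) = List.filter (fun k => pvCol s.toList k == c) (List.range N) := by
    apply List.filter_congr
    intro x hx
    have hxl : x < s.toList.length := lt_of_lt_of_le (List.mem_range.mp hx) h
    simp [Function.comp, PySem.Str.pyGet?_natCast, List.getElem?_eq_getElem hxl, pvCol,
      List.getD_eq_getElem _ _ hxl]
  rw [PySem.List.pyRange_zero_natCast, List.filter_map, hcong]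

theorem pvKeys_of_nodup (xs : List Int) (h : xs.Nodup) :
    ((xs.foldl (fun d i => d.insert i (1:Int)) (PySem.Dict.empty : PySem.Dict Int Int))).keys = xs := by
  rw [PySem.Dict.keys_foldl_insert]
  have : (PySem.Dict.empty : PySem.Dict Int Int).keys = ([] : List Int) := rfl
  rw [this, PySem.Set.update_nil_left, PySem.Set.ofList_eq_self_of_nodup _ h]

theorem pvContains_of_nodup (xs : List Int) (h : xs.Nodup) (x : Int) :
    ((xs.foldl (fun d i => d.insert i (1:Int)) (PySem.Dict.empty : PySem.Dict Int Int))).contains x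
      = decide (x ∈ xs) := by
  rw [PySem.Dict.contains_eq_decide_mem_keys, pvKeys_of_nodup xs h]
theorem pvMemBI (l : List Char) (N : ℕ) (x : ℕ) :
    ((x : Int) ∈ ((List.range N).filter (fun k => pvCol l k == 'B')).map (fun (k:ℕ) => (k:Int)))
      ↔ (x < N ∧ pvCol l x = 'B') := by
  simp [List.mem_filter]

theorem pvMemBI_neg (l : List Char) (N : ℕ) (z : Int) (hz : z < 0) :
    z ∉ ((List.range N).filter (fun k => pvCol l k == 'B')).map (fun (k:ℕ) => (k:Int)) := by
  intro hmem
  simp [List.mem_filter] at hmem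
  obtain ⟨a, _, ha⟩ := hmem
  omega

theorem pvTerm_eq (l : List Char) (N : ℕ) (i j : ℕ) (hi : i < N) (hj : j < N) :
    ((if decide ((max (i:Int) (j:Int) + (max (i:Int) (j:Int) - min (i:Int) (j:Int))) ∈
          ((List.range N).filter (fun k => pvCol l k == 'B')).map (fun (k:ℕ) => (k:Int))) then (1:Int) else 0)
      + (if decide ((min (i:Int) (j:Int) - (max (i:Int) (j:Int) - min (i:Int) (j:Int))) ∈
          ((List.range N).filter (fun k => pvCol l k == 'B')).map (fun (k:ℕ) => (k:Int))) then (1:Int) else 0)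
      + (if (PySem.Int.mod (max (i:Int) (j:Int) - min (i:Int) (j:Int)) 2 == 0 &&
            decide (PySem.Int.floordiv (max (i:Int) (j:Int) + min (i:Int) (j:Int)) 2 ∈
          ((List.range N).filter (fun k => pvCol l k == 'B')).map (fun (k:ℕ) => (k:Int)))) then (1:Int) else 0))
    = ((if (decide (2 * max i j - min i j < N) && (pvCol l (2 * max i j - min i j) == 'B')) then (1:Int) else 0)
      + (if (decide (max i j - min i j ≤ min i j) && (pvCol l (2 * min i j - max i j) == 'B')) then (1:Int) else 0)
      + (if (decide ((max i j - min i j) % 2 = 0) && (pvCol l ((max i j + min i j) / 2) == 'B')) then (1:Int) else 0)) := by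
  have hmM : min i j ≤ max i j := min_le_max
  have hmN : min i j < N := lt_of_le_of_lt (min_le_left i j) hi
  have hMN : max i j < N := max_lt hi hj
  congr 1
  · congr 1
    -- first term
    · have h1 : (max (i:Int) (j:Int) + (max (i:Int) (j:Int) - min (i:Int) (j:Int)))
          = ((2 * max i j - min i j : ℕ) : Int) := by
        omega
      rw [h1]
      by_cases hb : (2 * max i j - min i j < N ∧ pvCol l (2 * max i j - min i j) = 'B')
      · simp [pvMemBI, hb.1, hb.2]
      · simp only [pvMemBI]
        rw [if_neg (by simpa using hb), if_neg (by simp; intro h1 h2; exact absurd ⟨h1, by simpa using h2⟩ hb)]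
    -- second term
    · by_cases hle : max i j - min i j ≤ min i j
      · have h2 : (min (i:Int) (j:Int) - (max (i:Int) (j:Int) - min (i:Int) (j:Int)))
            = ((2 * min i j - max i j : ℕ) : Int) := by
          omega
        have hlt : 2 * min i j - max i j < N := by omega
        rw [h2]
        by_cases hb : pvCol l (2 * min i j - max i j) = 'B'
        · simp [pvMemBI, hb, hlt, hle]
        · simp [pvMemBI, hb, hle]
      · have hneg : (min (i:Int) (j:Int) - (max (i:Int) (j:Int) - min (i:Int) (j:Int))) < 0 := by
          omega
        rw [if_neg (by simpa using pvMemBI_neg l N _ hneg), if_neg (by simp [hle])]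
  -- third term
  · have h3 : (max (i:Int) (j:Int) - min (i:Int) (j:Int)) = ((max i j - min i j : ℕ) : Int) := by
      push_cast [Nat.cast_max, Nat.cast_min]; omega
    have h4 : (max (i:Int) (j:Int) + min (i:Int) (j:Int)) = ((max i j + min i j : ℕ) : Int) := by
      push_cast [Nat.cast_max, Nat.cast_min]; ring
    have h5 : PySem.Int.floordiv ((max i j + min i j : ℕ) : Int) 2 = (((max i j + min i j) / 2 : ℕ) : Int) := by
      exact_mod_cast PySem.Int.floordiv_natCast (max i j + min i j) 2
    have h6 : PySem.Int.mod ((max i j - min i j : ℕ) : Int) 2 = (((max i j - min i j) % 2 : ℕ) : Int) := by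
      exact_mod_cast PySem.Int.mod_natCast (max i j - min i j) 2
    have h7 : (max i j + min i j) / 2 < N := by omega
    rw [h3, h4, h5, h6]
    have hcond : ((((max i j - min i j) % 2 : ℕ) : Int) == 0 &&
        decide ((((max i j + min i j) / 2 : ℕ) : Int) ∈
          ((List.range N).filter (fun k => pvCol l k == 'B')).map (fun (k:ℕ) => (k:Int))))
        = (decide ((max i j - min i j) % 2 = 0) && (pvCol l ((max i j + min i j) / 2) == 'B')) := by
      rw [Bool.eq_iff_iff]
      simp only [Bool.and_eq_true, beq_iff_eq, decide_eq_true_eq, pvMemBI, Int.natCast_eq_zero]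
      exact ⟨fun ⟨a, _, c⟩ => ⟨a, c⟩, fun ⟨a, c⟩ => ⟨a, h7, c⟩⟩
    rw [hcond]

theorem pvA_eq (s : String) (N : ℕ) (h : N ≤ s.toList.length) :
    solve (N : Int) s
      = (pvCnt s.toList N 'R' : Int) * (pvCnt s.toList N 'G') * (pvCnt s.toList N 'B')
        - ((((pvPP N).filter (fun p => pvP1 s.toList N p)).card : Int)
           + ((pvPP N).filter (fun p => pvP2 s.toList N p)).card
           + ((pvPP N).filter (fun p => pvP3 s.toList N p)).card) := by
  have hnd : (((List.range N).filter (fun k => pvCol s.toList k == 'B')).map (fun (k:ℕ) => (k:Int))).Nodup :=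
    ((List.nodup_range).filter _).map (fun a b hab => by exact_mod_cast hab)
  refine Eq.trans (pvA_loop
      (((PySem.List.pyRange 0 (N:Int) 1).filter (fun i => PySem.Str.pyGet? s i == some 'B')).foldl
        (fun d i => d.insert i (1:Int)) PySem.Dict.empty)
      ((PySem.List.pyRange 0 (N:Int) 1).filter (fun i => PySem.Str.pyGet? s i == some 'R'))
      ((PySem.List.pyRange 0 (N:Int) 1).filter (fun i => PySem.Str.pyGet? s i == some 'G')) _) ?_
  rw [pvFilter_eq s N 'R' h, pvFilter_eq s N 'G' h, pvFilter_eq s N 'B' h]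
  simp only [pvContains_of_nodup _ hnd, pvKeys_of_nodup _ hnd, List.length_map, List.map_map,
    Function.comp]
  rw [pvSum_filter]
  simp only [pvSum_filter]
  simp only [Function.comp_apply]
  have hT : ∀ i ∈ Finset.range N, (if pvCol s.toList i == 'R' then
        (∑ j ∈ Finset.range N, if pvCol s.toList j == 'G' then
          ((if decide ((max (i:Int) (j:Int) + (max (i:Int) (j:Int) - min (i:Int) (j:Int))) ∈
              ((List.range N).filter (fun k => pvCol s.toList k == 'B')).map (fun (k:ℕ) => (k:Int))) then (1:Int) else 0)
            + (if decide ((min (i:Int) (j:Int) - (max (i:Int) (j:Int) - min (i:Int) (j:Int))) ∈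
              ((List.range N).filter (fun k => pvCol s.toList k == 'B')).map (fun (k:ℕ) => (k:Int))) then (1:Int) else 0)
            + (if (PySem.Int.mod (max (i:Int) (j:Int) - min (i:Int) (j:Int)) 2 == 0 &&
                decide (PySem.Int.floordiv (max (i:Int) (j:Int) + min (i:Int) (j:Int)) 2 ∈
              ((List.range N).filter (fun k => pvCol s.toList k == 'B')).map (fun (k:ℕ) => (k:Int)))) then (1:Int) else 0))
        else 0) else 0)
      = (if pvCol s.toList i == 'R' then
        (∑ j ∈ Finset.range N, if pvCol s.toList j == 'G' then
          ((if (decide (2 * max i j - min i j < N) && (pvCol s.toList (2 * max i j - min i j) == 'B')) then (1:Int) else 0)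
            + (if (decide (max i j - min i j ≤ min i j) && (pvCol s.toList (2 * min i j - max i j) == 'B')) then (1:Int) else 0)
            + (if (decide ((max i j - min i j) % 2 = 0) && (pvCol s.toList ((max i j + min i j) / 2) == 'B')) then (1:Int) else 0))
        else 0) else 0) := by
    intro i hi
    by_cases hp : pvCol s.toList i == 'R'
    · rw [if_pos hp, if_pos hp]
      refine Finset.sum_congr rfl ?_
      intro j hj
      by_cases hq : pvCol s.toList j == 'G'
      · rw [if_pos hq, if_pos hq]
        exact pvTerm_eq s.toList N i j (List.mem_range.mp (by simpa using hi)) (List.mem_range.mp (by simpa using hj))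
      · rw [if_neg hq, if_neg hq]
    · rw [if_neg hp, if_neg hp]
  rw [Finset.sum_congr rfl hT,
    pvSplit N (fun k => pvCol s.toList k == 'R') (fun k => pvCol s.toList k == 'G')
      (fun i j => decide (2 * max i j - min i j < N) && (pvCol s.toList (2 * max i j - min i j) == 'B'))
      (fun i j => decide (max i j - min i j ≤ min i j) && (pvCol s.toList (2 * min i j - max i j) == 'B'))
      (fun i j => decide ((max i j - min i j) % 2 = 0) && (pvCol s.toList ((max i j + min i j) / 2) == 'B'))]
  simp only [pvCnt, pvP1, pvP2, pvP3]
  rfl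

-- B-side closed form --------------------------------------------------------

theorem pvSum_range (N : ℕ) (f : ℕ → Int) :
    ((List.range N).map f).sum = ∑ i ∈ Finset.range N, f i := by
  induction N with
  | zero => simp
  | succ n ih => rw [List.range_succ, List.map_append, List.sum_append, Finset.sum_range_succ, ih]; simp

theorem pvFoldl_sub1 {a : Type} (l : List a) (P : a → Bool) (c : Int) :
    l.foldl (fun res x => if P x then res - 1 else res) c
      = c - (l.map (fun x => if P x then (1:Int) else 0)).sum := by
  rw [List.foldl_ext _ (fun res x => res - (if P x then (1:Int) else 0)) _
    (by intro a x _; by_cases hP : P x <;> simp [hP])]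
  rw [show (fun (res : Int) x => res - (if P x then (1:Int) else 0))
      = (fun res x => res - (fun x => if P x then (1:Int) else 0) x) from rfl]
  exact (by
    have hneg : ∀ (m : List a), (m.map (fun x => -(if P x then (1:Int) else 0))).sum
        = -(m.map (fun x => if P x then (1:Int) else 0)).sum := by
      intro m; induction m with
      | nil => simp
      | cons x xs ih => simp [ih]; ring
    have := PySem.List.foldl_add l (fun x => -(if P x then (1:Int) else 0)) c
    simp only [sub_eq_add_neg]
    rw [this, hneg])

theorem pvCounts_getD (s : String) (N : ℕ) (h : N ≤ s.toList.length) (c : Char) :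
    ((PySem.List.pyRange 0 (N:Int) 1).foldl (fun d j =>
        let ch := (PySem.Str.pyGet? s j).getD ' '
        d.insert ch (d.getD ch 0 + 1)) (PySem.Dict.empty : PySem.Dict Char Int)).getD c 0
      = (pvCnt s.toList N c : Int) := by
  rw [PySem.List.pyRange_zero_natCast, List.foldl_map]
  rw [List.foldl_ext _ (fun d (k:ℕ) => d.insert (pvCol s.toList k) (d.getD (pvCol s.toList k) 0 + 1)) _
    (by
      intro d k hk
      have hxl : k < s.toList.length := lt_of_lt_of_le (List.mem_range.mp hk) h
      simp only [PySem.Str.pyGet?_natCast, List.getElem?_eq_getElem hxl, Option.getD_some, pvCol,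
        List.getD_eq_getElem _ _ hxl])]
  have hmap := List.foldl_map (f := fun k => pvCol s.toList k)
    (g := fun (d : PySem.Dict Char Int) x => d.insert x (d.getD x 0 + 1))
    (l := List.range N) (init := (PySem.Dict.empty : PySem.Dict Char Int))
  simp only [← hmap]
  rw [PySem.Dict.getD_foldl_insert_add_one]
  simp [List.count_eq_countP, pvCnt, List.countP_eq_length_filter]
  rw [List.filter_map, List.length_map]
  exact congrArg List.length (List.filter_congr (fun x _ => rfl))

theorem pvB_loop (P : Int → Int → Bool) (innerL : Int → List Int) (outer : List Int) (c0 : Int) :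
    outer.foldl (fun res c => (innerL c).foldl (fun res d => if P c d then res - 1 else res) res) c0
      = c0 - (outer.map (fun c => ((innerL c).map (fun d => if P c d then (1:Int) else 0)).sum)).sum := by
  rw [List.foldl_ext _ (fun res c => res - ((innerL c).map (fun d => if P c d then (1:Int) else 0)).sum) _
    (by intro a cc _; exact pvFoldl_sub1 _ _ _)]
  exact pvFoldl_sub _ _ _

theorem pvBsum (l : List Char) (N : ℕ) :
    (∑ c ∈ Finset.range N, ∑ k ∈ Finset.range (min c (N-1-c)),
        (if ((pvCol l (c-(k+1)), pvCol l c, pvCol l (c+(k+1))) ∈ pvPerms) then (1:Int) else 0))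
      = (((pvPP N).filter (fun p => pvAP l N p)).card : Int) := by
  rw [show ((pvPP N).filter (fun p => pvAP l N p)) = ((Finset.range N ×ˢ Finset.range N).filter (fun p => pvAP l N p)) from rfl]
  rw [← Finset.sum_boole (fun p => pvAP l N p = true)]
  have heta : (fun (x : ℕ × ℕ) => if pvAP l N x = true then (1:Int) else 0)
      = fun x => if pvAP l N (x.1, x.2) = true then (1:Int) else 0 := by
    funext x; rfl
  rw [heta, Finset.sum_product' (f := fun c d => if pvAP l N (c, d) = true then (1:Int) else 0)]
  refine Finset.sum_congr rfl ?_
  intro c hc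
  have hcN : c < N := Finset.mem_range.mp hc
  rw [Finset.sum_boole, Finset.sum_boole]
  congr 1
  refine Finset.card_nbij' (fun k => k + 1) (fun d => d - 1) ?_ ?_ ?_ ?_
  · intro k hk
    simp only [Finset.coe_filter, Set.mem_setOf_eq, Finset.mem_range] at hk ⊢
    obtain ⟨hk1, hk2⟩ := hk
    refine ⟨by omega, ?_⟩
    simp only [pvAP, Bool.and_eq_true, decide_eq_true_eq]
    exact ⟨⟨⟨by omega, by omega⟩, by omega⟩, hk2⟩
  · intro d hd
    simp only [Finset.coe_filter, Set.mem_setOf_eq, Finset.mem_range] at hd ⊢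
    obtain ⟨hd1, hd2⟩ := hd
    simp only [pvAP, Bool.and_eq_true, decide_eq_true_eq] at hd2
    obtain ⟨⟨⟨h1, h2⟩, h3⟩, h4⟩ := hd2
    have hde : d - 1 + 1 = d := by omega
    refine ⟨by omega, ?_⟩
    rw [hde]
    exact h4
  · intro k hk
    show k + 1 - 1 = k
    omega
  · intro d hd
    simp only [Finset.coe_filter, Set.mem_setOf_eq] at hd
    simp only [pvAP, Bool.and_eq_true, decide_eq_true_eq] at hd
    show d - 1 + 1 = d
    omega

theorem pvB_eq (s : String) (N : ℕ) (h : N ≤ s.toList.length) :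
    solve_alt (N : Int) s
      = (pvCnt s.toList N 'R' : Int) * (pvCnt s.toList N 'G') * (pvCnt s.toList N 'B')
        - (((pvPP N).filter (fun p => pvAP s.toList N p)).card : Int) := by
  refine Eq.trans (pvB_loop
      (fun c d => pvPerms.contains ((PySem.Str.pyGet? s (c - d)).getD ' ',
                           (PySem.Str.pyGet? s c).getD ' ',
                           (PySem.Str.pyGet? s (c + d)).getD ' '))
      (fun c => PySem.List.pyRange 1 (min c ((N:Int) - 1 - c) + 1) 1)
      (PySem.List.pyRange 0 (N:Int) 1) _) ?_
  rw [pvCounts_getD s N h 'R', pvCounts_getD s N h 'G', pvCounts_getD s N h 'B']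
  congr 1
  rw [← pvBsum s.toList N]
  rw [PySem.List.pyRange_zero_natCast, List.map_map, pvSum_range]
  refine Finset.sum_congr rfl ?_
  intro c hc
  have hcN : c < N := Finset.mem_range.mp hc
  simp only [Function.comp_apply]
  have hbound : (min ((c:ℕ):Int) ((N:Int) - 1 - ((c:ℕ):Int)) + 1) = (((min c (N-1-c) + 1 : ℕ)) : Int) := by
    push_cast [Nat.cast_min]
    omega
  rw [hbound, PySem.List.pyRange_one]
  have htn : (((min c (N-1-c) + 1 : ℕ) : Int) - 1).toNat = min c (N-1-c) := by omega
  rw [htn, List.map_map, pvSum_range]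
  refine Finset.sum_congr rfl ?_
  intro k hk
  have hkm : k < min c (N-1-c) := Finset.mem_range.mp hk
  simp only [Function.comp_apply]
  -- index arithmetic
  have e1 : ((c:ℕ):Int) - (1 + (k:ℕ)) = (((c - (k+1) : ℕ)) : Int) := by omega
  have e2 : ((c:ℕ):Int) + (1 + (k:ℕ)) = (((c + (k+1) : ℕ)) : Int) := by omega
  have l1 : c - (k+1) < s.toList.length := by omega
  have l2 : c < s.toList.length := by omega
  have l3 : c + (k+1) < s.toList.length := by omega
  rw [e1, e2]
  simp only [PySem.Str.pyGet?_natCast, List.getElem?_eq_getElem l1, List.getElem?_eq_getElem l2,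
    List.getElem?_eq_getElem l3, Option.getD_some]
  simp only [pvCol, List.getD_eq_getElem _ _ l1, List.getD_eq_getElem _ _ l2,
    List.getD_eq_getElem _ _ l3]
  simp only [List.contains_iff_mem]

-- combinatorial core: A's three fired cases partition B's AP pairs ----------

-- membership characterizations
theorem pvMemT (l : List Char) (N : ℕ) (p : ℕ × ℕ) :
    p ∈ (pvPP N).filter (fun p => pvAP l N p)
      ↔ (p.1 < N ∧ p.2 < N) ∧ 1 ≤ p.2 ∧ p.2 ≤ p.1 ∧ p.1 + p.2 < N ∧
        (pvCol l (p.1 - p.2), pvCol l p.1, pvCol l (p.1 + p.2)) ∈ pvPerms := by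
  simp [pvPP, pvAP, Finset.mem_filter, Finset.mem_product, and_assoc]

-- partition of AP pairs by which of the three positions carries 'B'
theorem pvPartition (l : List Char) (N : ℕ) :
    ((pvPP N).filter (fun p => pvAP l N p)).card
      = (((pvPP N).filter (fun p => pvAP l N p)).filter (fun p => pvCol l (p.1 + p.2) = 'B')).card
        + (((pvPP N).filter (fun p => pvAP l N p)).filter (fun p => pvCol l (p.1 - p.2) = 'B')).card
        + (((pvPP N).filter (fun p => pvAP l N p)).filter (fun p => pvCol l p.1 = 'B')).card := by
  set T := (pvPP N).filter (fun p => pvAP l N p) with hT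
  have hone : ∀ p ∈ T, ((if pvCol l (p.1 + p.2) = 'B' then (1:ℕ) else 0)
      + (if pvCol l (p.1 - p.2) = 'B' then (1:ℕ) else 0)
      + (if pvCol l p.1 = 'B' then (1:ℕ) else 0)) = 1 := by
    intro p hp
    rw [hT, pvMemT] at hp
    obtain ⟨-, -, -, -, hperm⟩ := hp
    simp only [pvPerms, List.mem_cons, Prod.mk.injEq, List.not_mem_nil, or_false] at hperm
    rcases hperm with ⟨h1,h2,h3⟩|⟨h1,h2,h3⟩|⟨h1,h2,h3⟩|⟨h1,h2,h3⟩|⟨h1,h2,h3⟩|⟨h1,h2,h3⟩ <;>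
      simp [h1, h2, h3]
  have hcard : T.card = ∑ p ∈ T, ((if pvCol l (p.1 + p.2) = 'B' then (1:ℕ) else 0)
      + (if pvCol l (p.1 - p.2) = 'B' then (1:ℕ) else 0)
      + (if pvCol l p.1 = 'B' then (1:ℕ) else 0)) := by
    rw [Finset.card_eq_sum_ones]
    exact Finset.sum_congr rfl (fun p hp => (hone p hp).symm)
  rw [hcard]
  simp only [Finset.sum_add_distrib]
  rw [Finset.sum_boole, Finset.sum_boole, Finset.sum_boole]
  norm_num


theorem pvMemS1 (l : List Char) (N : ℕ) (p : ℕ × ℕ) :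
    p ∈ (pvPP N).filter (fun p => pvP1 l N p)
      ↔ (p.1 < N ∧ p.2 < N) ∧ pvCol l p.1 = 'R' ∧ pvCol l p.2 = 'G' ∧
        2 * max p.1 p.2 - min p.1 p.2 < N ∧ pvCol l (2 * max p.1 p.2 - min p.1 p.2) = 'B' := by
  simp [pvPP, pvP1, Finset.mem_filter, Finset.mem_product, and_assoc]

theorem pvS1 (l : List Char) (N : ℕ) :
    ((pvPP N).filter (fun p => pvP1 l N p)).card
      = (((pvPP N).filter (fun p => pvAP l N p)).filter (fun p => pvCol l (p.1 + p.2) = 'B')).card := by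
  refine Finset.card_nbij' (fun p => (max p.1 p.2, max p.1 p.2 - min p.1 p.2))
    (fun p => if pvCol l (p.1 - p.2) = 'R' then (p.1 - p.2, p.1) else (p.1, p.1 - p.2)) ?_ ?_ ?_ ?_
  · intro p hp
    simp only [Finset.mem_coe] at hp ⊢
    rw [pvMemS1] at hp
    obtain ⟨⟨h1N, h2N⟩, hR, hG, hltN, hB⟩ := hp
    have hne : p.1 ≠ p.2 := fun he => by rw [he, hG] at hR; exact absurd hR (by decide)
    rw [Finset.mem_filter, pvMemT]
    have hmM : min p.1 p.2 < max p.1 p.2 := by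
      rcases Nat.lt_or_ge p.1 p.2 with hlt | hge
      · simp [Nat.min_eq_left (le_of_lt hlt), Nat.max_eq_right (le_of_lt hlt), hlt]
      · have : p.2 < p.1 := lt_of_le_of_ne hge (Ne.symm hne)
        simp [Nat.min_eq_right (le_of_lt this), Nat.max_eq_left (le_of_lt this), this]
    refine ⟨⟨⟨by omega, by omega⟩, by omega, by omega, by omega, ?_⟩, ?_⟩
    · have e1 : max p.1 p.2 - (max p.1 p.2 - min p.1 p.2) = min p.1 p.2 := by omega
      have e2 : max p.1 p.2 + (max p.1 p.2 - min p.1 p.2) = 2 * max p.1 p.2 - min p.1 p.2 := by omega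
      rw [e1, e2, hB]
      rcases Nat.lt_or_ge p.1 p.2 with hlt | hge
      · rw [Nat.min_eq_left (le_of_lt hlt), Nat.max_eq_right (le_of_lt hlt), hR, hG]
        simp [pvPerms]
      · have h21 : p.2 < p.1 := by omega
        rw [Nat.min_eq_right (le_of_lt h21), Nat.max_eq_left (le_of_lt h21), hR, hG]
        simp [pvPerms]
    · have e2 : max p.1 p.2 + (max p.1 p.2 - min p.1 p.2) = 2 * max p.1 p.2 - min p.1 p.2 := by omega
      rw [e2, hB]
  · intro p hp
    simp only [Finset.mem_coe] at hp ⊢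
    rw [Finset.mem_filter, pvMemT] at hp
    obtain ⟨⟨⟨h1N, h2N⟩, hd1, hdc, hsN, hperm⟩, hq1⟩ := hp
    simp only [pvPerms, List.mem_cons, Prod.mk.injEq, List.not_mem_nil, or_false] at hperm
    rw [pvMemS1]
    rcases hperm with ⟨h1,h2,h3⟩|⟨h1,h2,h3⟩|⟨h1,h2,h3⟩|⟨h1,h2,h3⟩|⟨h1,h2,h3⟩|⟨h1,h2,h3⟩
    all_goals first
      | (rw [h3] at hq1; exact absurd hq1 (by decide))
      | skip
    · -- (R,G,B) : take (p.1-p.2, p.1)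
      rw [if_pos h1]
      have hmin : min (p.1 - p.2) p.1 = p.1 - p.2 := Nat.min_eq_left (by omega)
      have hmax : max (p.1 - p.2) p.1 = p.1 := Nat.max_eq_right (by omega)
      refine ⟨⟨by omega, by omega⟩, h1, h2, ?_, ?_⟩
      · rw [hmax, hmin]; omega
      · rw [hmax, hmin]
        have e : 2 * p.1 - (p.1 - p.2) = p.1 + p.2 := by omega
        rw [e]; exact h3
    · -- (G,R,B) : take (p.1, p.1-p.2)
      rw [if_neg (by rw [h1]; decide)]
      have hmin : min p.1 (p.1 - p.2) = p.1 - p.2 := Nat.min_eq_right (by omega)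
      have hmax : max p.1 (p.1 - p.2) = p.1 := Nat.max_eq_left (by omega)
      refine ⟨⟨by omega, by omega⟩, h2, h1, ?_, ?_⟩
      · rw [hmax, hmin]; omega
      · rw [hmax, hmin]
        have e : 2 * p.1 - (p.1 - p.2) = p.1 + p.2 := by omega
        rw [e]; exact h3
  · intro p hp
    simp only [Finset.mem_coe] at hp
    rw [pvMemS1] at hp
    obtain ⟨⟨h1N, h2N⟩, hR, hG, hltN, hB⟩ := hp
    have hne : p.1 ≠ p.2 := fun he => by rw [he, hG] at hR; exact absurd hR (by decide)
    rcases Nat.lt_or_ge p.1 p.2 with hlt | hge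
    · have hmin := Nat.min_eq_left (le_of_lt hlt)
      have hmax := Nat.max_eq_right (le_of_lt hlt)
      simp only [hmin, hmax]
      have e1 : p.2 - (p.2 - p.1) = p.1 := by omega
      rw [e1, if_pos hR]
    · have h21 : p.2 < p.1 := by omega
      have hmin := Nat.min_eq_right (le_of_lt h21)
      have hmax := Nat.max_eq_left (le_of_lt h21)
      simp only [hmin, hmax]
      have e1 : p.1 - (p.1 - p.2) = p.2 := by omega
      rw [e1, if_neg (by rw [hG]; decide)]
  · intro p hp
    simp only [Finset.mem_coe] at hp
    rw [Finset.mem_filter, pvMemT] at hp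
    obtain ⟨⟨⟨h1N, h2N⟩, hd1, hdc, hsN, hperm⟩, hq1⟩ := hp
    dsimp only
    by_cases hR : pvCol l (p.1 - p.2) = 'R'
    · rw [if_pos hR]
      dsimp only
      have hmin : min (p.1 - p.2) p.1 = p.1 - p.2 := Nat.min_eq_left (by omega)
      have hmax : max (p.1 - p.2) p.1 = p.1 := Nat.max_eq_right (by omega)
      rw [hmin, hmax]
      have e : p.1 - (p.1 - p.2) = p.2 := by omega
      rw [e]
    · rw [if_neg hR]
      dsimp only
      have hmin : min p.1 (p.1 - p.2) = p.1 - p.2 := Nat.min_eq_right (by omega)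
      have hmax : max p.1 (p.1 - p.2) = p.1 := Nat.max_eq_left (by omega)
      rw [hmin, hmax]
      have e : p.1 - (p.1 - p.2) = p.2 := by omega
      rw [e]


theorem pvMemS2 (l : List Char) (N : ℕ) (p : ℕ × ℕ) :
    p ∈ (pvPP N).filter (fun p => pvP2 l N p)
      ↔ (p.1 < N ∧ p.2 < N) ∧ pvCol l p.1 = 'R' ∧ pvCol l p.2 = 'G' ∧
        max p.1 p.2 - min p.1 p.2 ≤ min p.1 p.2 ∧ pvCol l (2 * min p.1 p.2 - max p.1 p.2) = 'B' := by
  simp [pvPP, pvP2, Finset.mem_filter, Finset.mem_product, and_assoc]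

theorem pvMemS3 (l : List Char) (N : ℕ) (p : ℕ × ℕ) :
    p ∈ (pvPP N).filter (fun p => pvP3 l N p)
      ↔ (p.1 < N ∧ p.2 < N) ∧ pvCol l p.1 = 'R' ∧ pvCol l p.2 = 'G' ∧
        (max p.1 p.2 - min p.1 p.2) % 2 = 0 ∧ pvCol l ((max p.1 p.2 + min p.1 p.2) / 2) = 'B' := by
  simp [pvPP, pvP3, Finset.mem_filter, Finset.mem_product, and_assoc]

theorem pvMinMax (p : ℕ × ℕ) (hne : p.1 ≠ p.2) :
    (min p.1 p.2 = p.1 ∧ max p.1 p.2 = p.2 ∧ p.1 < p.2) ∨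
    (min p.1 p.2 = p.2 ∧ max p.1 p.2 = p.1 ∧ p.2 < p.1) := by
  rcases Nat.lt_or_ge p.1 p.2 with hlt | hge
  · exact Or.inl ⟨Nat.min_eq_left (le_of_lt hlt), Nat.max_eq_right (le_of_lt hlt), hlt⟩
  · have : p.2 < p.1 := lt_of_le_of_ne hge (Ne.symm hne)
    exact Or.inr ⟨Nat.min_eq_right (le_of_lt this), Nat.max_eq_left (le_of_lt this), this⟩

theorem pvS2 (l : List Char) (N : ℕ) :
    ((pvPP N).filter (fun p => pvP2 l N p)).card
      = (((pvPP N).filter (fun p => pvAP l N p)).filter (fun p => pvCol l (p.1 - p.2) = 'B')).card := by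
  refine Finset.card_nbij' (fun p => (min p.1 p.2, max p.1 p.2 - min p.1 p.2))
    (fun p => if pvCol l p.1 = 'R' then (p.1, p.1 + p.2) else (p.1 + p.2, p.1)) ?_ ?_ ?_ ?_
  · intro p hp
    simp only [Finset.mem_coe] at hp ⊢
    rw [pvMemS2] at hp
    obtain ⟨⟨h1N, h2N⟩, hR, hG, hle, hB⟩ := hp
    have hne : p.1 ≠ p.2 := fun he => by rw [he, hG] at hR; exact absurd hR (by decide)
    rw [Finset.mem_filter, pvMemT]
    rcases pvMinMax p hne with ⟨hmin, hmax, hlt⟩ | ⟨hmin, hmax, hlt⟩ <;>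
    · refine ⟨⟨⟨by omega, by omega⟩, by omega, by omega, by omega, ?_⟩, ?_⟩
      · have e1 : min p.1 p.2 - (max p.1 p.2 - min p.1 p.2) = 2 * min p.1 p.2 - max p.1 p.2 := by omega
        have e2 : min p.1 p.2 + (max p.1 p.2 - min p.1 p.2) = max p.1 p.2 := by omega
        rw [e1, e2, hB, hmin, hmax, hR, hG]
        simp [pvPerms]
      · have e1 : min p.1 p.2 - (max p.1 p.2 - min p.1 p.2) = 2 * min p.1 p.2 - max p.1 p.2 := by omega
        rw [e1, hB]
  · intro p hp
    simp only [Finset.mem_coe] at hp ⊢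
    rw [Finset.mem_filter, pvMemT] at hp
    obtain ⟨⟨⟨h1N, h2N⟩, hd1, hdc, hsN, hperm⟩, hq2⟩ := hp
    simp only [pvPerms, List.mem_cons, Prod.mk.injEq, List.not_mem_nil, or_false] at hperm
    rw [pvMemS2]
    rcases hperm with ⟨h1,h2,h3⟩|⟨h1,h2,h3⟩|⟨h1,h2,h3⟩|⟨h1,h2,h3⟩|⟨h1,h2,h3⟩|⟨h1,h2,h3⟩
    all_goals first
      | (rw [h1] at hq2; exact absurd hq2 (by decide))
      | skip
    · -- (B,R,G) : take (p.1, p.1+p.2)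
      rw [if_pos h2]
      have hmin : min p.1 (p.1 + p.2) = p.1 := Nat.min_eq_left (by omega)
      have hmax : max p.1 (p.1 + p.2) = p.1 + p.2 := Nat.max_eq_right (by omega)
      refine ⟨⟨by omega, by omega⟩, h2, h3, ?_, ?_⟩ <;>
        · rw [hmax, hmin]
          have e : 2 * p.1 - (p.1 + p.2) = p.1 - p.2 := by omega
          first | omega | (rw [e]; exact hq2)
    · -- (B,G,R) : take (p.1+p.2, p.1)
      rw [if_neg (by rw [h2]; decide)]
      have hmin : min (p.1 + p.2) p.1 = p.1 := Nat.min_eq_right (by omega)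
      have hmax : max (p.1 + p.2) p.1 = p.1 + p.2 := Nat.max_eq_left (by omega)
      refine ⟨⟨by omega, by omega⟩, h3, h2, ?_, ?_⟩ <;>
        · rw [hmax, hmin]
          have e : 2 * p.1 - (p.1 + p.2) = p.1 - p.2 := by omega
          first | omega | (rw [e]; exact hq2)
  · intro p hp
    simp only [Finset.mem_coe] at hp
    rw [pvMemS2] at hp
    obtain ⟨⟨h1N, h2N⟩, hR, hG, hle, hB⟩ := hp
    have hne : p.1 ≠ p.2 := fun he => by rw [he, hG] at hR; exact absurd hR (by decide)
    dsimp only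
    rcases pvMinMax p hne with ⟨hmin, hmax, hlt⟩ | ⟨hmin, hmax, hlt⟩
    · rw [hmin, hmax, if_pos hR]
      have e : p.1 + (p.2 - p.1) = p.2 := by omega
      rw [e]
    · rw [hmin, hmax]
      rw [if_neg (by rw [hG]; decide)]
      have e : p.2 + (p.1 - p.2) = p.1 := by omega
      rw [e]
  · intro p hp
    simp only [Finset.mem_coe] at hp
    rw [Finset.mem_filter, pvMemT] at hp
    obtain ⟨⟨⟨h1N, h2N⟩, hd1, hdc, hsN, hperm⟩, hq2⟩ := hp
    dsimp only
    by_cases hR : pvCol l p.1 = 'R'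
    · rw [if_pos hR]
      dsimp only
      have hmin : min p.1 (p.1 + p.2) = p.1 := Nat.min_eq_left (by omega)
      have hmax : max p.1 (p.1 + p.2) = p.1 + p.2 := Nat.max_eq_right (by omega)
      rw [hmin, hmax]
      have e : p.1 + p.2 - p.1 = p.2 := by omega
      rw [e]
    · rw [if_neg hR]
      dsimp only
      have hmin : min (p.1 + p.2) p.1 = p.1 := Nat.min_eq_right (by omega)
      have hmax : max (p.1 + p.2) p.1 = p.1 + p.2 := Nat.max_eq_left (by omega)
      rw [hmin, hmax]
      have e : p.1 + p.2 - p.1 = p.2 := by omega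
      rw [e]

theorem pvS3 (l : List Char) (N : ℕ) :
    ((pvPP N).filter (fun p => pvP3 l N p)).card
      = (((pvPP N).filter (fun p => pvAP l N p)).filter (fun p => pvCol l p.1 = 'B')).card := by
  refine Finset.card_nbij' (fun p => ((max p.1 p.2 + min p.1 p.2) / 2, (max p.1 p.2 - min p.1 p.2) / 2))
    (fun p => if pvCol l (p.1 - p.2) = 'R' then (p.1 - p.2, p.1 + p.2) else (p.1 + p.2, p.1 - p.2)) ?_ ?_ ?_ ?_
  · intro p hp
    simp only [Finset.mem_coe] at hp ⊢
    rw [pvMemS3] at hp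
    obtain ⟨⟨h1N, h2N⟩, hR, hG, heven, hB⟩ := hp
    have hne : p.1 ≠ p.2 := fun he => by rw [he, hG] at hR; exact absurd hR (by decide)
    rw [Finset.mem_filter, pvMemT]
    rcases pvMinMax p hne with ⟨hmin, hmax, hlt⟩ | ⟨hmin, hmax, hlt⟩ <;>
    · refine ⟨⟨⟨by omega, by omega⟩, by omega, by omega, by omega, ?_⟩, ?_⟩
      · have e1 : (max p.1 p.2 + min p.1 p.2) / 2 - (max p.1 p.2 - min p.1 p.2) / 2 = min p.1 p.2 := by omega
        have e2 : (max p.1 p.2 + min p.1 p.2) / 2 + (max p.1 p.2 - min p.1 p.2) / 2 = max p.1 p.2 := by omega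
        rw [e1, e2, hB, hmin, hmax, hR, hG]
        simp [pvPerms]
      · exact hB
  · intro p hp
    simp only [Finset.mem_coe] at hp ⊢
    rw [Finset.mem_filter, pvMemT] at hp
    obtain ⟨⟨⟨h1N, h2N⟩, hd1, hdc, hsN, hperm⟩, hq3⟩ := hp
    simp only [pvPerms, List.mem_cons, Prod.mk.injEq, List.not_mem_nil, or_false] at hperm
    rw [pvMemS3]
    rcases hperm with ⟨h1,h2,h3⟩|⟨h1,h2,h3⟩|⟨h1,h2,h3⟩|⟨h1,h2,h3⟩|⟨h1,h2,h3⟩|⟨h1,h2,h3⟩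
    all_goals first
      | (rw [h2] at hq3; exact absurd hq3 (by decide))
      | skip
    · -- (R,B,G) : take (p.1-p.2, p.1+p.2)
      rw [if_pos h1]
      have hmin : min (p.1 - p.2) (p.1 + p.2) = p.1 - p.2 := Nat.min_eq_left (by omega)
      have hmax : max (p.1 - p.2) (p.1 + p.2) = p.1 + p.2 := Nat.max_eq_right (by omega)
      refine ⟨⟨by omega, by omega⟩, h1, h3, ?_, ?_⟩ <;>
        · rw [hmax, hmin]
          have e : (p.1 + p.2 + (p.1 - p.2)) / 2 = p.1 := by omega
          first | omega | (rw [e]; exact hq3)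
    · -- (G,B,R) : take (p.1+p.2, p.1-p.2)
      rw [if_neg (by rw [h1]; decide)]
      have hmin : min (p.1 + p.2) (p.1 - p.2) = p.1 - p.2 := Nat.min_eq_right (by omega)
      have hmax : max (p.1 + p.2) (p.1 - p.2) = p.1 + p.2 := Nat.max_eq_left (by omega)
      refine ⟨⟨by omega, by omega⟩, h3, h1, ?_, ?_⟩ <;>
        · rw [hmax, hmin]
          have e : (p.1 + p.2 + (p.1 - p.2)) / 2 = p.1 := by omega
          first | omega | (rw [e]; exact hq3)
  · intro p hp
    simp only [Finset.mem_coe] at hp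
    rw [pvMemS3] at hp
    obtain ⟨⟨h1N, h2N⟩, hR, hG, heven, hB⟩ := hp
    have hne : p.1 ≠ p.2 := fun he => by rw [he, hG] at hR; exact absurd hR (by decide)
    dsimp only
    rcases pvMinMax p hne with ⟨hmin, hmax, hlt⟩ | ⟨hmin, hmax, hlt⟩
    · have e1 : (max p.1 p.2 + min p.1 p.2) / 2 - (max p.1 p.2 - min p.1 p.2) / 2 = p.1 := by omega
      have e2 : (max p.1 p.2 + min p.1 p.2) / 2 + (max p.1 p.2 - min p.1 p.2) / 2 = p.2 := by omega
      rw [e1, e2, if_pos hR]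
    · have e1 : (max p.1 p.2 + min p.1 p.2) / 2 - (max p.1 p.2 - min p.1 p.2) / 2 = p.2 := by omega
      have e2 : (max p.1 p.2 + min p.1 p.2) / 2 + (max p.1 p.2 - min p.1 p.2) / 2 = p.1 := by omega
      rw [e1, e2]
      rw [if_neg (by rw [hG]; decide)]
  · intro p hp
    simp only [Finset.mem_coe] at hp
    rw [Finset.mem_filter, pvMemT] at hp
    obtain ⟨⟨⟨h1N, h2N⟩, hd1, hdc, hsN, hperm⟩, hq3⟩ := hp
    dsimp only
    by_cases hR : pvCol l (p.1 - p.2) = 'R'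
    · rw [if_pos hR]
      dsimp only
      have hmin : min (p.1 - p.2) (p.1 + p.2) = p.1 - p.2 := Nat.min_eq_left (by omega)
      have hmax : max (p.1 - p.2) (p.1 + p.2) = p.1 + p.2 := Nat.max_eq_right (by omega)
      rw [hmin, hmax]
      have e1 : (p.1 + p.2 + (p.1 - p.2)) / 2 = p.1 := by omega
      have e2 : (p.1 + p.2 - (p.1 - p.2)) / 2 = p.2 := by omega
      rw [e1, e2]
    · rw [if_neg hR]
      dsimp only
      have hmin : min (p.1 + p.2) (p.1 - p.2) = p.1 - p.2 := Nat.min_eq_right (by omega)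
      have hmax : max (p.1 + p.2) (p.1 - p.2) = p.1 + p.2 := Nat.max_eq_left (by omega)
      rw [hmin, hmax]
      have e1 : (p.1 + p.2 + (p.1 - p.2)) / 2 = p.1 := by omega
      have e2 : (p.1 + p.2 - (p.1 - p.2)) / 2 = p.2 := by omega
      rw [e1, e2]

theorem pvCore (l : List Char) (N : ℕ) :
    ((pvPP N).filter (fun p => pvP1 l N p)).card
      + ((pvPP N).filter (fun p => pvP2 l N p)).card
      + ((pvPP N).filter (fun p => pvP3 l N p)).card
    = ((pvPP N).filter (fun p => pvAP l N p)).card := by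
  rw [pvPartition l N, pvS1 l N, pvS2 l N, pvS3 l N]

-- ===== VERDICT (by name: the statement is the Claim_ definition above) =====
theorem solve_spec : Claim_equal_solve := by
  intro n s _ hpre
  unfold Spec_solve
  by_cases hn : n ≤ 0
  · simp [solve, solve_alt, PySem.List.pyRange_one_eq_nil hn]
  · have hN : n = ((n.toNat : ℕ) : Int) := by omega
    have hlen : n.toNat ≤ s.toList.length := by
      unfold Pre_solve at hpre; omega
    rw [hN, pvA_eq s n.toNat hlen, pvB_eq s n.toNat hlen]
    congr 1
    exact_mod_cast pvCore s.toList n.toNat
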